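-- pv_equiv track=rewrite | github.com/wzygxr/shuati | class092_IntervalDynamicProgramming/POJ2955_Brackets.py | solve
-- ===== SOURCE A (Python) =====
-- def solve(s):
--     """
--     主函数：解决最长合法括号子序列问题
--     时间复杂度: O(n^3) - 三层循环：区间长度、区间起点、分割点
--     空间复杂度: O(n^2) - dp数组占用空间
--     """
--     n = len(s)
--     if n == 0:
--         return 0
--
--     # dp[i][j]表示区间[i,j]内最长合法括号子序列的长度
--     dp = [[0] * n for _ in range(n)]
--
--     # 初始化：单个字符无法构成合法序列
--     for i in range(n):
--         dp[i][i] = 0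
--
--     # 枚举区间长度，从2开始
--     for length in range(2, n + 1):
--         # 枚举区间起点i
--         for i in range(n - length + 1):
--             # 计算区间终点j
--             j = i + length - 1
--
--             # 如果两端字符匹配
--             if (s[i] == '(' and s[j] == ')') or (s[i] == '[' and s[j] == ']'):
--                 if length == 2:
--                     # 长度为2且匹配
--                     dp[i][j] = 2
--                 else:
--                     # 长度大于2且匹配
--                     dp[i][j] = dp[i+1][j-1] + 2
--
--             # 枚举分割点k，取最大值
--             for k in range(i, j):
--                 dp[i][j] = max(dp[i][j], dp[i][k] + dp[k+1][j])
--
--     return dp[0][n-1]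
-- ===== SOURCE B (Python) =====
-- def solve(s):
--     n = len(s)
--     memo = {}
--     def best(i, j):
--         if j <= i:
--             return 0
--         if (i, j) in memo:
--             return memo[(i, j)]
--         if (s[i] == '(' and s[j] == ')') or (s[i] == '[' and s[j] == ']'):
--             res = best(i + 1, j - 1) + 2
--         else:
--             res = 0
--         for k in range(i, j):
--             res = max(res, best(i, k) + best(k + 1, j))
--         memo[(i, j)] = res
--         return res
--     return best(0, n - 1)
-- ===== Notes on version B (the rewrite author's own statement) =====
-- stated objective: alternative
-- what changed: Replaces A's bottom-up three-nested-loop interval DP table with a top-down memoized recursion best(i,j) over intervals, computing only on demand and storing results in a dict.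
import Mathlib
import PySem

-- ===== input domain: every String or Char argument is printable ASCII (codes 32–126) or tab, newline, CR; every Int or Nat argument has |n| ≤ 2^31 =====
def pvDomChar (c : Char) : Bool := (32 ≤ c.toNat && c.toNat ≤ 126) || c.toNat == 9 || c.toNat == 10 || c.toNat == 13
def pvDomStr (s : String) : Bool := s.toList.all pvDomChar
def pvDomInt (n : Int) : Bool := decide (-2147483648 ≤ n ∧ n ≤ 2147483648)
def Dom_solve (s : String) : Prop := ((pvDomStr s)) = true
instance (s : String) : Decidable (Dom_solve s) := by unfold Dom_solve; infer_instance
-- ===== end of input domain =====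

-- B changes the decomposition: A fills a bottom-up O(n^3) interval-DP table with three nested
-- loops; B is a top-down memoized recursion best(i, j) over the same intervals (objective:
-- alternative — same asymptotic cost, genuinely different control structure).

-- ===== PORT A =====
-- the bracket-matching test (s[i],s[j]) — the same inline condition appears in both Pythons
def pvMatch (cs : List Char) (i j : Int) : Bool :=
  (PySem.List.pyGetD cs i ' ' == '(' && PySem.List.pyGetD cs j ' ' == ')')
    || (PySem.List.pyGetD cs i ' ' == '[' && PySem.List.pyGetD cs j ' ' == ']')

-- dp[i][j] read / write (Python's dp[i][j] and dp[i][j] = v on the list-of-lists)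
def pvGet2 (dp : List (List Int)) (i j : Int) : Int :=
  PySem.List.pyGetD (PySem.List.pyGetD dp i []) j 0

def pvSet2 (dp : List (List Int)) (i j : Int) (v : Int) : List (List Int) :=
  PySem.List.pySetD dp i (PySem.List.pySetD (PySem.List.pyGetD dp i []) j v)

def solve (s : String) : Int :=
  let cs := s.toList
  let n : Int := PySem.List.len cs
  if n = 0 then 0
  else
    -- dp = [[0] * n for _ in range(n)]
    let dp0 : List (List Int) :=
      (PySem.List.pyRange 0 n 1).map (fun _ => List.replicate cs.length (0 : Int))
    -- for i in range(n): dp[i][i] = 0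
    let dp1 := (PySem.List.pyRange 0 n 1).foldl (fun dp i => pvSet2 dp i i 0) dp0
    -- for length in range(2, n + 1): for i in range(n - length + 1): …
    let dp2 := (PySem.List.pyRange 2 (n + 1) 1).foldl (fun dp len =>
      (PySem.List.pyRange 0 (n - len + 1) 1).foldl (fun dp i =>
        let j := i + len - 1
        let dp :=
          if pvMatch cs i j then
            if len = 2 then pvSet2 dp i j 2
            else pvSet2 dp i j (pvGet2 dp (i + 1) (j - 1) + 2)
          else dp
        (PySem.List.pyRange i j 1).foldl (fun dp k =>
          pvSet2 dp i j (max (pvGet2 dp i j) (pvGet2 dp i k + pvGet2 dp (k + 1) j))) dp) dp) dp1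
    pvGet2 dp2 0 (n - 1)

-- ===== PORT B =====
-- best(i, j) with the memo dict threaded through; the fuel argument only makes the
-- recursion structural (solve_alt passes fuel ≥ j - i, so the 0 case is never reached)
def pvBest (cs : List Char) :
    Nat → Int → Int → PySem.Dict (Int × Int) Int → Int × PySem.Dict (Int × Int) Int
  | 0, _, _, memo => (0, memo)
  | fuel + 1, i, j, memo =>
    if j ≤ i then (0, memo)
    else
      match memo.get? (i, j) with
      | some v => (v, memo)
      | none =>
        let p0 : Int × PySem.Dict (Int × Int) Int :=
          if pvMatch cs i j then
            let r := pvBest cs fuel (i + 1) (j - 1) memo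
            (r.1 + 2, r.2)
          else (0, memo)
        let p1 := (PySem.List.pyRange i j 1).foldl
          (fun (p : Int × PySem.Dict (Int × Int) Int) k =>
            let a := pvBest cs fuel i k p.2
            let b := pvBest cs fuel (k + 1) j a.2
            (max p.1 (a.1 + b.1), b.2)) p0
        (p1.1, p1.2.insert (i, j) p1.1)

def solve_alt (s : String) : Int :=
  let cs := s.toList
  (pvBest cs cs.length 0 (PySem.List.len cs - 1) PySem.Dict.empty).1

-- ===== PRECONDITION & SPEC =====
def Spec_solve (s : String) (out : Int) : Prop := out = solve_alt s
instance (s : String) (out : Int) : Decidable (Spec_solve s out) := by unfold Spec_solve; infer_instance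

-- ===== CLAIM (what is proved, stated in full; the proofs are below) =====
def Claim_equal_solve : Prop := ∀ (s : String), Dom_solve s → Spec_solve s (solve s)

-- ===== LEMMAS AND PROOFS =====

-- Pure reference function: the interval-DP value, with fuel (fuel ≥ j - i suffices).
def bf (cs : List Char) : Nat → Int → Int → Int
  | 0, _, _ => 0
  | fuel + 1, i, j =>
    if j ≤ i then 0
    else
      (PySem.List.pyRange i j 1).foldl
        (fun r k => max r (bf cs fuel i k + bf cs fuel (k + 1) j))
        (if pvMatch cs i j then bf cs fuel (i + 1) (j - 1) + 2 else 0)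

def bst (cs : List Char) (i j : Int) : Int := bf cs (j - i).toNat i j

theorem bst_zero (cs : List Char) {i j : Int} (h : j ≤ i) : bst cs i j = 0 := by
  unfold bst
  have : (j - i).toNat = 0 := by omega
  rw [this]; rfl

theorem bf_fuel (cs : List Char) :
    ∀ fuel (i j : Int), (j - i).toNat ≤ fuel → bf cs fuel i j = bst cs i j := by
  intro fuel
  induction fuel using Nat.strong_induction_on with
  | _ fuel IH =>
    intro i j hle
    match fuel with
    | 0 =>
      have h0 : (j - i).toNat = 0 := by omega
      unfold bst; rw [h0]
    | f + 1 =>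
      by_cases hji : j ≤ i
      · rw [bst_zero cs hji]; simp [bf, hji]
      · rw [not_le] at hji
        have hm : (j - i).toNat = ((j - i).toNat - 1) + 1 := by omega
        set m := (j - i).toNat - 1 with hmdef
        unfold bst
        rw [hm]
        show bf cs (f + 1) i j = bf cs (m + 1) i j
        simp only [bf, if_neg (not_le.mpr hji)]
        have hbase : (if pvMatch cs i j then bf cs f (i + 1) (j - 1) + 2 else 0)
            = (if pvMatch cs i j then bf cs m (i + 1) (j - 1) + 2 else 0) := by
          rw [IH f (by omega) (i + 1) (j - 1) (by omega),
              IH m (by omega) (i + 1) (j - 1) (by omega)]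
        rw [hbase]
        apply PySem.List.foldl_congr_mem
        intro acc k hk
        obtain ⟨hk1, hk2⟩ := (PySem.List.mem_pyRange_one).1 hk
        rw [IH f (by omega) i k (by omega), IH m (by omega) i k (by omega),
            IH f (by omega) (k + 1) j (by omega), IH m (by omega) (k + 1) j (by omega)]

theorem bst_eq (cs : List Char) {i j : Int} (h : i < j) :
    bst cs i j =
      (PySem.List.pyRange i j 1).foldl
        (fun r k => max r (bst cs i k + bst cs (k + 1) j))
        (if pvMatch cs i j then bst cs (i + 1) (j - 1) + 2 else 0) := by
  have hm : (j - i).toNat = ((j - i).toNat - 1) + 1 := by omega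
  unfold bst
  rw [hm]
  simp only [bf, if_neg (not_le.mpr h)]
  set m := (j - i).toNat - 1 with hmdef
  have hbase : (if pvMatch cs i j then bf cs m (i + 1) (j - 1) + 2 else 0)
      = (if pvMatch cs i j then bst cs (i + 1) (j - 1) + 2 else 0) := by
    rw [bf_fuel cs m (i + 1) (j - 1) (by omega)]
  rw [hbase]
  apply PySem.List.foldl_congr_mem
  intro acc k hk
  obtain ⟨hk1, hk2⟩ := (PySem.List.mem_pyRange_one).1 hk
  rw [bf_fuel cs m i k (by omega), bf_fuel cs m (k + 1) j (by omega)]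
  rfl

-- ---- B side ----
def MOK (cs : List Char) (memo : PySem.Dict (Int × Int) Int) : Prop :=
  ∀ (i j v : Int), memo.get? (i, j) = some v → v = bst cs i j

theorem pvBest_fold_aux (cs : List Char) (f : Nat) (i j : Int)
    (hsub : ∀ (a b : Int) mm, (b - a).toNat ≤ f → MOK cs mm →
      (pvBest cs f a b mm).1 = bst cs a b ∧ MOK cs (pvBest cs f a b mm).2) :
    ∀ (l : List Int), (∀ k ∈ l, i ≤ k ∧ k < j ∧ (k - i).toNat ≤ f ∧ (j - (k + 1)).toNat ≤ f) →
    ∀ (p : Int × PySem.Dict (Int × Int) Int), MOK cs p.2 →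
      (l.foldl (fun (p : Int × PySem.Dict (Int × Int) Int) k =>
          let a := pvBest cs f i k p.2
          let b := pvBest cs f (k + 1) j a.2
          (max p.1 (a.1 + b.1), b.2)) p).1
        = l.foldl (fun r k => max r (bst cs i k + bst cs (k + 1) j)) p.1
      ∧ MOK cs (l.foldl (fun (p : Int × PySem.Dict (Int × Int) Int) k =>
          let a := pvBest cs f i k p.2
          let b := pvBest cs f (k + 1) j a.2
          (max p.1 (a.1 + b.1), b.2)) p).2 := by
  intro l
  induction l with
  | nil => intro _ p hp; exact ⟨rfl, hp⟩
  | cons k l ihl =>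
    intro hb p hp
    obtain ⟨r, mm⟩ := p
    obtain ⟨hk1, hk2, hk3, hk4⟩ := hb k (List.mem_cons_self ..)
    obtain ⟨ha1, ha2⟩ := hsub i k mm hk3 hp
    obtain ⟨hb1, hb2⟩ := hsub (k + 1) j (pvBest cs f i k mm).2 hk4 ha2
    have hstep : (let a := pvBest cs f i k ((r, mm) : Int × PySem.Dict (Int × Int) Int).2
          let b := pvBest cs f (k + 1) j a.2
          ((max (r, mm).1 (a.1 + b.1), b.2) : Int × PySem.Dict (Int × Int) Int))
        = (max r (bst cs i k + bst cs (k + 1) j),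
           (pvBest cs f (k + 1) j (pvBest cs f i k mm).2).2) := by
      show (max r ((pvBest cs f i k mm).1 + (pvBest cs f (k + 1) j (pvBest cs f i k mm).2).1),
            (pvBest cs f (k + 1) j (pvBest cs f i k mm).2).2) = _
      rw [ha1, hb1]
    rw [List.foldl_cons, List.foldl_cons, hstep]
    exact ihl (fun k' hk' => hb k' (List.mem_cons_of_mem _ hk')) _ hb2

theorem pvBest_correct (cs : List Char) :
    ∀ fuel (i j : Int) memo, (j - i).toNat ≤ fuel → MOK cs memo →
      (pvBest cs fuel i j memo).1 = bst cs i j ∧ MOK cs (pvBest cs fuel i j memo).2 := by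
  intro fuel
  induction fuel using Nat.strong_induction_on with
  | _ fuel IH =>
    intro i j memo hle hmok
    match fuel with
    | 0 =>
      have hji : j ≤ i := by omega
      exact ⟨(bst_zero cs hji).symm, hmok⟩
    | f + 1 =>
      by_cases hji : j ≤ i
      · simp only [pvBest, if_pos hji]
        exact ⟨(bst_zero cs hji).symm, hmok⟩
      · rw [not_le] at hji
        have hsub : ∀ (a b : Int) mm, (b - a).toNat ≤ f → MOK cs mm →
            (pvBest cs f a b mm).1 = bst cs a b ∧ MOK cs (pvBest cs f a b mm).2 :=
          fun a b mm h1 h2 => IH f (by omega) a b mm h1 h2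
        simp only [pvBest, if_neg (not_le.mpr hji)]
        cases hget : memo.get? (i, j) with
        | some v => exact ⟨hmok i j v hget, hmok⟩
        | none =>
          have hp01 : ((if pvMatch cs i j then
                (((pvBest cs f (i + 1) (j - 1) memo).1 + 2 : Int),
                  (pvBest cs f (i + 1) (j - 1) memo).2)
              else ((0 : Int), memo)) : Int × PySem.Dict (Int × Int) Int).1
              = (if pvMatch cs i j then bst cs (i + 1) (j - 1) + 2 else 0) := by
            by_cases hmch : pvMatch cs i j
            · rw [if_pos hmch, if_pos hmch, (hsub (i + 1) (j - 1) memo (by omega) hmok).1]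
            · rw [if_neg hmch, if_neg hmch]
          have hp02 : MOK cs ((if pvMatch cs i j then
                (((pvBest cs f (i + 1) (j - 1) memo).1 + 2 : Int),
                  (pvBest cs f (i + 1) (j - 1) memo).2)
              else ((0 : Int), memo)) : Int × PySem.Dict (Int × Int) Int).2 := by
            by_cases hmch : pvMatch cs i j
            · rw [if_pos hmch]
              exact (hsub (i + 1) (j - 1) memo (by omega) hmok).2
            · rw [if_neg hmch]
              exact hmok
          obtain ⟨hf1, hf2⟩ := pvBest_fold_aux cs f i j hsub (PySem.List.pyRange i j 1)
            (by
              intro k hk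
              obtain ⟨h1, h2⟩ := (PySem.List.mem_pyRange_one).1 hk
              exact ⟨h1, h2, by omega, by omega⟩)
            ((if pvMatch cs i j then
                (((pvBest cs f (i + 1) (j - 1) memo).1 + 2 : Int),
                  (pvBest cs f (i + 1) (j - 1) memo).2)
              else ((0 : Int), memo)) : Int × PySem.Dict (Int × Int) Int) hp02
          have hp1v : ((PySem.List.pyRange i j 1).foldl
              (fun (p : Int × PySem.Dict (Int × Int) Int) k =>
                let a := pvBest cs f i k p.2
                let b := pvBest cs f (k + 1) j a.2
                (max p.1 (a.1 + b.1), b.2))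
              ((if pvMatch cs i j then
                  (((pvBest cs f (i + 1) (j - 1) memo).1 + 2 : Int),
                    (pvBest cs f (i + 1) (j - 1) memo).2)
                else ((0 : Int), memo)) : Int × PySem.Dict (Int × Int) Int)).1
              = bst cs i j := by
            rw [hf1, hp01, ← bst_eq cs hji]
          refine ⟨hp1v, ?_⟩
          intro a b v hv
          by_cases hab : ((a, b) : Int × Int) = (i, j)
          · obtain ⟨ha, hb⟩ := Prod.ext_iff.1 hab
            subst ha; subst hb
            rw [PySem.Dict.get?_insert_self] at hv
            cases hv
            exact hp1v.symm ▸ rfl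
          · rw [PySem.Dict.get?_insert_of_ne _ _ hab] at hv
            exact hf2 a b v hv

-- ---- A side ----
def Dims (n : Nat) (dp : List (List Int)) : Prop :=
  dp.length = n ∧ ∀ r ∈ dp, r.length = n

theorem get2_set2 (n : Nat) (dp : List (List Int)) (hd : Dims n dp)
    {a b i j : Int} (ha : 0 ≤ a) (ha' : a < (n : Int)) (hb : 0 ≤ b) (hb' : b < (n : Int))
    (hi : 0 ≤ i) (hi' : i < (n : Int)) (hj : 0 ≤ j) (hj' : j < (n : Int)) (v : Int) :
    pvGet2 (pvSet2 dp a b v) i j = if i = a ∧ j = b then v else pvGet2 dp i j := by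
  obtain ⟨hlen, hrows⟩ := hd
  subst hlen
  have haN : a.toNat < dp.length := by omega
  have hiN : i.toNat < dp.length := by omega
  have hrowa : dp[a.toNat].length = dp.length := hrows _ (dp.getElem_mem haN)
  have hrowi : dp[i.toNat].length = dp.length := hrows _ (dp.getElem_mem hiN)
  unfold pvGet2 pvSet2
  rw [PySem.List.pySetD_of_nonneg _ _ ha,
      PySem.List.pyGetD_eq_getElem dp ([] : List Int) ha ha',
      PySem.List.pySetD_of_nonneg _ _ hb,
      PySem.List.pyGetD_eq_getElem _ ([] : List Int) hi (by simpa using hi'),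
      List.getElem_set]
  by_cases hia : i = a
  · subst hia
    rw [if_pos rfl,
        PySem.List.pyGetD_eq_getElem _ (0 : Int) hj (by simp [hrowi]; omega),
        List.getElem_set,
        PySem.List.pyGetD_eq_getElem dp ([] : List Int) hi hi',
        PySem.List.pyGetD_eq_getElem _ (0 : Int) hj (by rw [hrowi]; exact_mod_cast hj')]
    by_cases hjb : j = b
    · subst hjb
      rw [if_pos rfl, if_pos ⟨rfl, rfl⟩]
    · rw [if_neg (by omega), if_neg (by simp [hjb])]
  · rw [if_neg (by omega),
        PySem.List.pyGetD_eq_getElem dp ([] : List Int) hi hi',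
        if_neg (by simp [hia])]

theorem dims_set2 (n : Nat) (dp : List (List Int)) (hd : Dims n dp)
    {a b : Int} (ha : 0 ≤ a) (ha' : a < (n : Int)) (hb : 0 ≤ b) (v : Int) :
    Dims n (pvSet2 dp a b v) := by
  obtain ⟨hlen, hrows⟩ := hd
  unfold pvSet2
  rw [PySem.List.pySetD_of_nonneg _ _ ha]
  constructor
  · simpa using hlen
  · intro r hr
    rcases List.mem_or_eq_of_mem_set hr with h | h
    · exact hrows r h
    · subst h
      rw [PySem.List.pySetD_of_nonneg _ _ hb]
      simp only [List.length_set]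
      have hin : PySem.Raise.InRange dp.length a := by
        simp [PySem.Raise.InRange]; omega
      exact hrows _ (PySem.List.pyGetD_mem dp ([] : List Int) hin)

theorem get2_zero (dp : List (List Int))
    (h : ∀ r ∈ dp, ∀ x ∈ r, x = (0 : Int)) (i j : Int) : pvGet2 dp i j = 0 := by
  unfold pvGet2
  have hdef : ∀ (xs : List (List Int)) (k : Int), PySem.List.pyGetD xs k ([] : List Int) = (PySem.List.pyGet? xs k).getD [] := fun _ _ => rfl
  have hdef2 : ∀ (xs : List Int) (k : Int), PySem.List.pyGetD xs k (0 : Int) = (PySem.List.pyGet? xs k).getD 0 := fun _ _ => rfl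
  rw [hdef]
  cases hrow : PySem.List.pyGet? dp i with
  | none => simp [hdef2, PySem.List.pyGet?]
  | some r =>
    have hr := PySem.List.mem_of_pyGet?_eq_some _ hrow
    simp only [Option.getD_some]
    rw [hdef2]
    cases hx : PySem.List.pyGet? r j with
    | none => simp
    | some x =>
      have := PySem.List.mem_of_pyGet?_eq_some _ hx
      simp only [Option.getD_some]
      exact h r hr x this

-- invariant while processing interval length L, with starts < p already updated
def InvStep (cs : List Char) (L p : Int) (dp : List (List Int)) : Prop :=
  Dims cs.length dp ∧
  ∀ i j : Int, 0 ≤ i → i ≤ j → j < (cs.length : Int) →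
    pvGet2 dp i j =
      if j - i + 1 < L ∨ (j - i + 1 = L ∧ i < p) then bst cs i j else 0

theorem zero_set2 (dp : List (List Int)) (h : ∀ r ∈ dp, ∀ x ∈ r, x = (0 : Int))
    {a b : Int} (ha : 0 ≤ a) (hb : 0 ≤ b) : ∀ r ∈ pvSet2 dp a b 0, ∀ x ∈ r, x = 0 := by
  unfold pvSet2
  rw [PySem.List.pySetD_of_nonneg _ _ ha, PySem.List.pySetD_of_nonneg _ _ hb]
  intro r hr x hx
  rcases List.mem_or_eq_of_mem_set hr with h1 | h1
  · exact h r h1 x hx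
  · subst h1
    rcases List.mem_or_eq_of_mem_set hx with h2 | h2
    · have hdef : PySem.List.pyGetD dp a ([] : List Int)
          = (PySem.List.pyGet? dp a).getD [] := rfl
      rw [hdef] at h2
      cases hrow : PySem.List.pyGet? dp a with
      | none => rw [hrow] at h2; cases h2
      | some r' =>
        rw [hrow] at h2
        exact h r' (PySem.List.mem_of_pyGet?_eq_some _ hrow) x h2
    · exact h2

theorem invstep2_of_zero (cs : List Char) (dp : List (List Int))
    (hd : Dims cs.length dp) (hz : ∀ r ∈ dp, ∀ x ∈ r, x = (0 : Int)) :
    InvStep cs 2 0 dp := by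
  refine ⟨hd, ?_⟩
  intro i j h1 h2 h3
  rw [get2_zero dp hz i j]
  split_ifs with hc
  · rcases hc with hc | ⟨_, hc2⟩
    · rw [bst_zero cs (by omega)]
    · omega
  · rfl

theorem init_zero (cs : List Char) :
    Dims cs.length
      ((PySem.List.pyRange 0 (cs.length : Int) 1).foldl (fun dp i => pvSet2 dp i i 0)
        ((PySem.List.pyRange 0 (cs.length : Int) 1).map
          (fun _ => List.replicate cs.length (0 : Int))))
    ∧ ∀ r ∈ ((PySem.List.pyRange 0 (cs.length : Int) 1).foldl (fun dp i => pvSet2 dp i i 0)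
        ((PySem.List.pyRange 0 (cs.length : Int) 1).map
          (fun _ => List.replicate cs.length (0 : Int)))), ∀ x ∈ r, x = (0 : Int) := by
  have hd0 : Dims cs.length ((PySem.List.pyRange 0 (cs.length : Int) 1).map
      (fun _ => List.replicate cs.length (0 : Int))) := by
    constructor
    · rw [List.length_map, PySem.List.length_pyRange_one]; omega
    · intro r hr
      obtain ⟨_, _, rfl⟩ := List.mem_map.1 hr
      exact List.length_replicate
  have hz0 : ∀ r ∈ ((PySem.List.pyRange 0 (cs.length : Int) 1).map
      (fun _ => List.replicate cs.length (0 : Int))), ∀ x ∈ r, x = (0 : Int) := by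
    intro r hr x hx
    obtain ⟨_, _, rfl⟩ := List.mem_map.1 hr
    exact List.eq_of_mem_replicate hx
  have main : ∀ (l : List Int), (∀ i ∈ l, 0 ≤ i ∧ i < (cs.length : Int)) →
      ∀ dp, Dims cs.length dp → (∀ r ∈ dp, ∀ x ∈ r, x = (0 : Int)) →
      Dims cs.length (l.foldl (fun dp i => pvSet2 dp i i 0) dp)
      ∧ ∀ r ∈ (l.foldl (fun dp i => pvSet2 dp i i 0) dp), ∀ x ∈ r, x = (0 : Int) := by
    intro l
    induction l with
    | nil => intro _ dp hd hz; exact ⟨hd, hz⟩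
    | cons i l ihl =>
      intro hb dp hd hz
      obtain ⟨h1, h2⟩ := hb i (List.mem_cons_self ..)
      rw [List.foldl_cons]
      exact ihl (fun k hk => hb k (List.mem_cons_of_mem _ hk)) _
        (dims_set2 cs.length dp hd h1 h2 h1 0) (zero_set2 dp hz h1 h1)
  exact main _ (fun i hi => by
    obtain ⟨g1, g2⟩ := (PySem.List.mem_pyRange_one).1 hi; exact ⟨g1, by omega⟩) _ hd0 hz0

theorem kfold_lemma (cs : List Char) (i j : Int) (hi : 0 ≤ i) (hij : i < j)
    (hj : j < (cs.length : Int)) :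
    ∀ (l : List Int), (∀ k ∈ l, i ≤ k ∧ k < j) →
    ∀ dp, Dims cs.length dp →
    (∀ i' j' : Int, 0 ≤ i' → i' ≤ j' → j' < (cs.length : Int) →
        j' - i' + 1 < j - i + 1 → pvGet2 dp i' j' = bst cs i' j') →
    Dims cs.length (l.foldl (fun dp k =>
        pvSet2 dp i j (max (pvGet2 dp i j) (pvGet2 dp i k + pvGet2 dp (k + 1) j))) dp)
    ∧ pvGet2 (l.foldl (fun dp k =>
        pvSet2 dp i j (max (pvGet2 dp i j) (pvGet2 dp i k + pvGet2 dp (k + 1) j))) dp) i j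
      = l.foldl (fun r k => max r (bst cs i k + bst cs (k + 1) j)) (pvGet2 dp i j)
    ∧ ∀ i' j' : Int, 0 ≤ i' → i' < (cs.length : Int) → 0 ≤ j' → j' < (cs.length : Int) →
        ¬(i' = i ∧ j' = j) →
        pvGet2 (l.foldl (fun dp k =>
          pvSet2 dp i j (max (pvGet2 dp i j) (pvGet2 dp i k + pvGet2 dp (k + 1) j))) dp) i' j'
        = pvGet2 dp i' j' := by
  intro l
  induction l with
  | nil => intro _ dp hd _; exact ⟨hd, rfl, fun _ _ _ _ _ _ _ => rfl⟩
  | cons k l ihl =>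
    intro hb dp hd hsh
    obtain ⟨hk1, hk2⟩ := hb k (List.mem_cons_self ..)
    have hik : pvGet2 dp i k = bst cs i k := hsh i k hi hk1 (by omega) (by omega)
    have hkj : pvGet2 dp (k + 1) j = bst cs (k + 1) j :=
      hsh (k + 1) j (by omega) (by omega) hj (by omega)
    have hdA : Dims cs.length (pvSet2 dp i j
        (max (pvGet2 dp i j) (pvGet2 dp i k + pvGet2 dp (k + 1) j))) :=
      dims_set2 cs.length dp hd hi (by omega) (by omega) _
    have hcell : pvGet2 (pvSet2 dp i j
        (max (pvGet2 dp i j) (pvGet2 dp i k + pvGet2 dp (k + 1) j))) i j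
        = max (pvGet2 dp i j) (bst cs i k + bst cs (k + 1) j) := by
      rw [get2_set2 cs.length dp hd hi (by omega) (by omega) hj hi (by omega) (by omega) hj,
          if_pos ⟨rfl, rfl⟩, hik, hkj]
    have hoff : ∀ i' j' : Int, 0 ≤ i' → i' < (cs.length : Int) → 0 ≤ j' →
        j' < (cs.length : Int) → ¬(i' = i ∧ j' = j) →
        pvGet2 (pvSet2 dp i j
          (max (pvGet2 dp i j) (pvGet2 dp i k + pvGet2 dp (k + 1) j))) i' j'
        = pvGet2 dp i' j' := by
      intro i' j' g1 g2 g3 g4 g5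
      rw [get2_set2 cs.length dp hd hi (by omega) (by omega) hj g1 g2 g3 g4, if_neg g5]
    have hshA : ∀ i' j' : Int, 0 ≤ i' → i' ≤ j' → j' < (cs.length : Int) →
        j' - i' + 1 < j - i + 1 →
        pvGet2 (pvSet2 dp i j
          (max (pvGet2 dp i j) (pvGet2 dp i k + pvGet2 dp (k + 1) j))) i' j'
        = bst cs i' j' := by
      intro i' j' g1 g2 g3 g4
      rw [hoff i' j' g1 (by omega) (by omega) g3 (by omega)]
      exact hsh i' j' g1 g2 g3 g4
    obtain ⟨r1, r2, r3⟩ := ihl (fun k' hk' => hb k' (List.mem_cons_of_mem _ hk')) _ hdA hshA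
    refine ⟨r1, ?_, ?_⟩
    · rw [List.foldl_cons, r2, hcell, List.foldl_cons]
    · intro i' j' g1 g2 g3 g4 g5
      rw [List.foldl_cons, r3 i' j' g1 g2 g3 g4 g5, hoff i' j' g1 g2 g3 g4 g5]

theorem body_step (cs : List Char) {L p : Int} (hL : 2 ≤ L) (hp : 0 ≤ p)
    (hp' : p + L - 1 < (cs.length : Int)) (dp : List (List Int)) (h : InvStep cs L p dp) :
    InvStep cs L (p + 1)
      ((PySem.List.pyRange p (p + L - 1) 1).foldl
        (fun dp k => pvSet2 dp p (p + L - 1)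
          (max (pvGet2 dp p (p + L - 1)) (pvGet2 dp p k + pvGet2 dp (k + 1) (p + L - 1))))
        (if pvMatch cs p (p + L - 1) then
            if L = 2 then pvSet2 dp p (p + L - 1) 2
            else pvSet2 dp p (p + L - 1) (pvGet2 dp (p + 1) (p + L - 1 - 1) + 2)
          else dp)) := by
  obtain ⟨hd, hinv⟩ := h
  have hpj : p < p + L - 1 := by omega
  -- the matched-ends pre-pass: its cell value and its effect on other cells
  have hdA : Dims cs.length (if pvMatch cs p (p + L - 1) then
      if L = 2 then pvSet2 dp p (p + L - 1) 2
      else pvSet2 dp p (p + L - 1) (pvGet2 dp (p + 1) (p + L - 1 - 1) + 2)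
    else dp) := by
    split_ifs
    · exact dims_set2 cs.length dp ⟨hd.1, hd.2⟩ hp (by omega) (by omega) _
    · exact dims_set2 cs.length dp ⟨hd.1, hd.2⟩ hp (by omega) (by omega) _
    · exact ⟨hd.1, hd.2⟩
  have hoffA : ∀ i' j' : Int, 0 ≤ i' → i' < (cs.length : Int) → 0 ≤ j' →
      j' < (cs.length : Int) → ¬(i' = p ∧ j' = p + L - 1) →
      pvGet2 (if pvMatch cs p (p + L - 1) then
          if L = 2 then pvSet2 dp p (p + L - 1) 2
          else pvSet2 dp p (p + L - 1) (pvGet2 dp (p + 1) (p + L - 1 - 1) + 2)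
        else dp) i' j' = pvGet2 dp i' j' := by
    intro i' j' g1 g2 g3 g4 g5
    split_ifs
    · rw [get2_set2 cs.length dp hd hp (by omega) (by omega) (by omega) g1 g2 g3 g4, if_neg g5]
    · rw [get2_set2 cs.length dp hd hp (by omega) (by omega) (by omega) g1 g2 g3 g4, if_neg g5]
    · rfl
  have hcell0 : pvGet2 dp p (p + L - 1) = 0 := by
    rw [hinv p (p + L - 1) hp (by omega) hp', if_neg (by omega)]
  have hcellA : pvGet2 (if pvMatch cs p (p + L - 1) then
      if L = 2 then pvSet2 dp p (p + L - 1) 2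
      else pvSet2 dp p (p + L - 1) (pvGet2 dp (p + 1) (p + L - 1 - 1) + 2)
    else dp) p (p + L - 1)
      = (if pvMatch cs p (p + L - 1) then bst cs (p + 1) (p + L - 1 - 1) + 2 else 0) := by
    by_cases hm : pvMatch cs p (p + L - 1)
    · rw [if_pos hm, if_pos hm]
      by_cases h2 : L = 2
      · rw [if_pos h2,
            get2_set2 cs.length dp hd hp (by omega) (by omega) (by omega) hp (by omega)
              (by omega) (by omega), if_pos ⟨rfl, rfl⟩, bst_zero cs (by omega)]
        norm_num
      · rw [if_neg h2,
            get2_set2 cs.length dp hd hp (by omega) (by omega) (by omega) hp (by omega)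
              (by omega) (by omega), if_pos ⟨rfl, rfl⟩,
            hinv (p + 1) (p + L - 1 - 1) (by omega) (by omega) (by omega),
            if_pos (by omega)]
    · rw [if_neg hm, if_neg hm, hcell0]
  have hshA : ∀ i' j' : Int, 0 ≤ i' → i' ≤ j' → j' < (cs.length : Int) →
      j' - i' + 1 < (p + L - 1) - p + 1 →
      pvGet2 (if pvMatch cs p (p + L - 1) then
          if L = 2 then pvSet2 dp p (p + L - 1) 2
          else pvSet2 dp p (p + L - 1) (pvGet2 dp (p + 1) (p + L - 1 - 1) + 2)
        else dp) i' j' = bst cs i' j' := by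
    intro i' j' g1 g2 g3 g4
    rw [hoffA i' j' g1 (by omega) (by omega) g3 (by omega),
        hinv i' j' g1 g2 g3, if_pos (by omega)]
  obtain ⟨r1, r2, r3⟩ := kfold_lemma cs p (p + L - 1) hp hpj (by omega)
    (PySem.List.pyRange p (p + L - 1) 1)
    (fun k hk => (PySem.List.mem_pyRange_one).1 hk) _ hdA hshA
  refine ⟨r1, ?_⟩
  intro i j g1 g2 g3
  by_cases hc : i = p ∧ j = p + L - 1
  · obtain ⟨rfl, rfl⟩ := hc
    rw [if_pos (show (i + L - 1) - i + 1 < L ∨ ((i + L - 1) - i + 1 = L ∧ i < i + 1) from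
          by omega),
        r2, hcellA, ← bst_eq cs hpj]
  · rw [r3 i j g1 (by omega) (by omega) g3 hc, hoffA i j g1 (by omega) (by omega) g3 hc,
        hinv i j g1 g2 g3]
    by_cases hc2 : j - i + 1 < L ∨ (j - i + 1 = L ∧ i < p + 1)
    · rw [if_pos (show j - i + 1 < L ∨ (j - i + 1 = L ∧ i < p) from by omega), if_pos hc2]
    · rw [if_neg (show ¬(j - i + 1 < L ∨ (j - i + 1 = L ∧ i < p)) from by omega), if_neg hc2]

theorem inner_fold (cs : List Char) (L : Int) (hL : 2 ≤ L) (_hLn : L ≤ (cs.length : Int)) :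
    ∀ (d : Nat) (p : Int), 0 ≤ p → p + d = (cs.length : Int) - L + 1 →
    ∀ dp, InvStep cs L p dp →
    InvStep cs L ((cs.length : Int) - L + 1)
      ((PySem.List.pyRange p ((cs.length : Int) - L + 1) 1).foldl
        (fun dp i =>
          let j := i + L - 1
          let dp :=
            if pvMatch cs i j then
              if L = 2 then pvSet2 dp i j 2
              else pvSet2 dp i j (pvGet2 dp (i + 1) (j - 1) + 2)
            else dp
          (PySem.List.pyRange i j 1).foldl (fun dp k =>
            pvSet2 dp i j (max (pvGet2 dp i j) (pvGet2 dp i k + pvGet2 dp (k + 1) j))) dp)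
        dp) := by
  intro d
  induction d with
  | zero =>
    intro p hp hpd dp h
    rw [PySem.List.pyRange_one_eq_nil (by omega)]
    have : p = (cs.length : Int) - L + 1 := by omega
    rw [← this]
    exact h
  | succ d ihd =>
    intro p hp hpd dp h
    rw [PySem.List.pyRange_one_cons (by omega), List.foldl_cons]
    exact ihd (p + 1) (by omega) (by omega) _
      (body_step cs hL hp (by omega) dp h)

theorem invstep_shift (cs : List Char) (L : Int) (_hL : 2 ≤ L) (_hLn : L ≤ (cs.length : Int))
    (dp : List (List Int)) (h : InvStep cs L ((cs.length : Int) - L + 1) dp) :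
    InvStep cs (L + 1) 0 dp := by
  obtain ⟨hd, hinv⟩ := h
  refine ⟨hd, ?_⟩
  intro i j g1 g2 g3
  rw [hinv i j g1 g2 g3]
  by_cases hc : j - i + 1 < L + 1
  · rw [if_pos (by omega), if_pos (by omega)]
  · rw [if_neg (by omega), if_neg (by omega)]

theorem outer_fold (cs : List Char) :
    ∀ (d : Nat) (L : Int), 2 ≤ L → L + d = (cs.length : Int) + 1 →
    ∀ dp, InvStep cs L 0 dp →
    InvStep cs ((cs.length : Int) + 1) 0
      ((PySem.List.pyRange L ((cs.length : Int) + 1) 1).foldl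
        (fun dp len =>
          (PySem.List.pyRange 0 ((cs.length : Int) - len + 1) 1).foldl
            (fun dp i =>
              let j := i + len - 1
              let dp :=
                if pvMatch cs i j then
                  if len = 2 then pvSet2 dp i j 2
                  else pvSet2 dp i j (pvGet2 dp (i + 1) (j - 1) + 2)
                else dp
              (PySem.List.pyRange i j 1).foldl (fun dp k =>
                pvSet2 dp i j (max (pvGet2 dp i j) (pvGet2 dp i k + pvGet2 dp (k + 1) j))) dp)
            dp)
        dp) := by
  intro d
  induction d with
  | zero =>
    intro L hL hLd dp h
    rw [PySem.List.pyRange_one_eq_nil (by omega)]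
    have : L = (cs.length : Int) + 1 := by omega
    rw [← this]
    exact h
  | succ d ihd =>
    intro L hL hLd dp h
    rw [PySem.List.pyRange_one_cons (by omega), List.foldl_cons]
    exact ihd (L + 1) (by omega) (by omega) _
      (invstep_shift cs L hL (by omega) _
        (inner_fold cs L hL (by omega) ((cs.length : Int) - L + 1).toNat 0 (by omega)
          (by omega) dp h))

theorem solve_eq_bst (s : String) :
    solve s = bst s.toList 0 ((s.toList.length : Int) - 1) := by
  unfold solve
  simp only [PySem.List.len_eq]
  by_cases hn : ((s.toList.length : Int)) = 0
  · rw [if_pos hn, bst_zero s.toList (by omega)]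
  · rw [if_neg hn]
    obtain ⟨hd1, hz1⟩ := init_zero s.toList
    have h2 := outer_fold s.toList ((s.toList.length : Int) - 1).toNat 2 (by omega)
      (by omega) _ (invstep2_of_zero s.toList _ hd1 hz1)
    have h3 := h2.2 0 ((s.toList.length : Int) - 1) (by omega) (by omega) (by omega)
    rw [if_pos (by omega)] at h3
    exact h3

theorem solve_alt_eq_bst (s : String) :
    solve_alt s = bst s.toList 0 ((s.toList.length : Int) - 1) := by
  unfold solve_alt
  have hmok : MOK s.toList PySem.Dict.empty := by
    intro i j v hv
    cases hv
  have h := (pvBest_correct s.toList s.toList.length 0 (PySem.List.len s.toList - 1)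
    PySem.Dict.empty (by simp [PySem.List.len_eq]) hmok).1
  rw [h, PySem.List.len_eq]

-- ===== VERDICT (by name: the statement is the Claim_ definition above) =====
theorem solve_spec : Claim_equal_solve := by
  intro s _
  unfold Spec_solve
  rw [solve_eq_bst, solve_alt_eq_bst]
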